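-- pv_equiv track=rewrite | github.com/james-stevens/pyrar | python/lib/validate.py | is_valid_display_name
-- ===== SOURCE A (Python) =====
-- def is_valid_display_name(name):
--     if len(name.split(" ")) > 3:
--         return False
--     for illegal in "\\/:%=&'\";)({}#][<>\n\t":
--         if name.find(illegal) >= 0:
--             return False
--     for illegal in ["--", ".."]:
--         if name.find(illegal) >= 0:
--             return False
--     return True
-- ===== SOURCE B (Python) =====
-- def is_valid_display_name(name):
--     if len(name.split(" ")) > 3:
--         return False
--     illegal = set("\\/:%=&'\";)({}#][<>\n\t")
--     for i in range(len(name)):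
--         if name[i] in illegal:
--             return False
--         if name[i:i+2] in ("--", ".."):
--             return False
--     return True
-- ===== Notes on version B (the rewrite author's own statement) =====
-- stated objective: alternative
-- what changed: The repeated str.find scans (one full scan per forbidden character and per forbidden two-char substring) are replaced by a single forward pass over the string that checks each position against a set of illegal characters and against the two two-char substrings; the split-based space guard is kept.
import Mathlib
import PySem

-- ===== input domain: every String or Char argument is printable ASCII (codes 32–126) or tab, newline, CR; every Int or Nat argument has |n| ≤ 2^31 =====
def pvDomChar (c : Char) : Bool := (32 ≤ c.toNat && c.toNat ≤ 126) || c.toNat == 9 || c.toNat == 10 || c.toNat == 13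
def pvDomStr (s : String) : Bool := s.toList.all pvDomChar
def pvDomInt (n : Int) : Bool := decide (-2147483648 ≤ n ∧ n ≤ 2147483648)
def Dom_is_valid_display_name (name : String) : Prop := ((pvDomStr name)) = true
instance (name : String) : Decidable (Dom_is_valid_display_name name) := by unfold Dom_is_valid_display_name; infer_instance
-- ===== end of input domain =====

-- B replaces A's per-pattern str.find scans by one forward pass over the string (alternative decomposition, same result).

-- ===== PORT A =====
def is_valid_display_name (name : String) : Bool :=
  if 3 < ((PySem.Str.split? name " ").getD []).length then false
  else if ("\\/:%=&'\";)({}#][<>\n\t".toList).any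
      (fun c => decide (0 ≤ PySem.Str.find name (String.ofList [c]))) then false
  else if (["--", ".."] : List String).any
      (fun sub => decide (0 ≤ PySem.Str.find name sub)) then false
  else true

-- ===== PORT B =====
-- single forward pass of Source B: at index i check the char and the two-char slice name[i:i+2]
def pvAltLoop (cs : List Char) (ill : PySem.Set Char) (i : Nat) : Bool :=
  if h : i < cs.length then
    if cs[i] ∈ ill then false
    else if PySem.List.slice cs (some (i : Int)) (some ((i : Int) + 2)) = "--".toList
         ∨ PySem.List.slice cs (some (i : Int)) (some ((i : Int) + 2)) = "..".toList then false
    else pvAltLoop cs ill (i + 1)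
  else true
termination_by cs.length - i

def is_valid_display_name_alt (name : String) : Bool :=
  if 3 < ((PySem.Str.split? name " ").getD []).length then false
  else pvAltLoop name.toList (PySem.Set.ofList "\\/:%=&'\";)({}#][<>\n\t".toList) 0

-- ===== PRECONDITION & SPEC =====
def Spec_is_valid_display_name (name : String) (out : Bool) : Prop := out = is_valid_display_name_alt name
instance (name : String) (out : Bool) : Decidable (Spec_is_valid_display_name name out) := by unfold Spec_is_valid_display_name; infer_instance

-- ===== CLAIM (what is proved, stated in full; the proofs are below) =====
def Claim_equal_is_valid_display_name : Prop := ∀ (name : String), Dom_is_valid_display_name name → Spec_is_valid_display_name name (is_valid_display_name name)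

-- ===== LEMMAS AND PROOFS =====

-- a singleton list is an infix iff its element is a member
theorem pv_singleton_infix {α : Type} (c : α) (l : List α) : [c] <:+: l ↔ c ∈ l := by
  constructor
  · intro h; exact List.singleton_sublist.mp h.sublist
  · intro h
    obtain ⟨s, t, rfl⟩ := List.append_of_mem h
    exact ⟨s, t, by simp⟩

-- the two-char slice at i equals sub iff sub is a prefix of the drop
theorem pv_slice_two_eq_iff (cs : List Char) (i : Nat) (sub : List Char) (hsub : sub.length = 2) :
    PySem.List.slice cs (some (i : Int)) (some ((i : Int) + 2)) = sub ↔ sub <+: cs.drop i := by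
  have h2 : ((i : Int) + 2) = ((i : Int) + ((2 : Nat) : Int)) := by norm_num
  rw [h2, PySem.List.slice_natCast_add]
  rw [List.prefix_iff_eq_take, hsub]
  exact eq_comm

-- loop characterization
theorem pvAltLoop_iff (cs : List Char) (ill : PySem.Set Char) (i : Nat) :
    pvAltLoop cs ill i = true ↔
      ∀ j, i ≤ j → ∀ (hj : j < cs.length),
        cs[j] ∉ ill ∧ ¬("--".toList <+: cs.drop j) ∧ ¬("..".toList <+: cs.drop j) := by
  generalize hk : cs.length - i = k
  induction k generalizing i with
  | zero =>
    rw [pvAltLoop]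
    have hi : ¬ i < cs.length := by omega
    simp only [hi, dite_false]
    constructor
    · intro _ j hij hj; omega
    · intro _; trivial
  | succ k ih =>
    have hi : i < cs.length := by omega
    rw [pvAltLoop]
    simp only [hi, dite_true]
    by_cases hmem : cs[i] ∈ ill
    · simp only [hmem, if_true]
      constructor
      · intro h; exact absurd h (by simp)
      · intro h; exact absurd ((h i le_rfl hi).1) (by simp [hmem])
    · simp only [hmem, if_false]
      by_cases hsl : PySem.List.slice cs (some (i : Int)) (some ((i : Int) + 2)) = "--".toList
        ∨ PySem.List.slice cs (some (i : Int)) (some ((i : Int) + 2)) = "..".toList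
      · simp only [hsl, if_true]
        constructor
        · intro h; exact absurd h (by simp)
        · intro h
          rcases hsl with hsl | hsl
          · exact absurd ((pv_slice_two_eq_iff cs i _ (by decide)).mp hsl) (h i le_rfl hi).2.1
          · exact absurd ((pv_slice_two_eq_iff cs i _ (by decide)).mp hsl) (h i le_rfl hi).2.2
      · simp only [hsl, if_false]
        rw [ih (i + 1) (by omega)]
        rw [not_or] at hsl
        constructor
        · intro h j hij hj
          rcases Nat.eq_or_lt_of_le hij with heq | hij'
          · subst heq
            refine ⟨hmem, ?_, ?_⟩
            · intro hp; exact hsl.1 ((pv_slice_two_eq_iff cs i _ (by decide)).mpr hp)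
            · intro hp; exact hsl.2 ((pv_slice_two_eq_iff cs i _ (by decide)).mpr hp)
          · exact h j hij' hj
        · intro h j hij hj; exact h j (by omega) hj

-- a nonempty pattern is an infix iff it is a prefix of some in-range drop
theorem pv_infix_iff_forall_drop (sub l : List Char) (hne : sub ≠ []) :
    (¬ sub <:+: l) ↔ ∀ j, j < l.length → ¬ sub <+: l.drop j := by
  rw [← PySem.Chars.isIn_iff_infix, ← PySem.Chars.exists_prefix_drop_iff_isIn]
  constructor
  · intro h j _ hp; exact h ⟨j, hp⟩
  · rintro h ⟨j, hp⟩
    by_cases hj : j < l.length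
    · exact h j hj hp
    · have hd : l.drop j = [] := List.drop_eq_nil_of_le (by omega)
      rw [hd] at hp
      exact hne (List.prefix_nil.mp hp)

-- the two 'any' scans of A are both false iff every position passes B's per-position check
theorem pv_conds_iff (name : String) :
    (("\\/:%=&'\";)({}#][<>\n\t".toList).any
        (fun c => decide (0 ≤ PySem.Str.find name (String.ofList [c]))) = false
      ∧ (["--", ".."] : List String).any
        (fun sub => decide (0 ≤ PySem.Str.find name sub)) = false)
    ↔ ∀ j, 0 ≤ j → ∀ (hj : j < name.toList.length),
        name.toList[j] ∉ PySem.Set.ofList "\\/:%=&'\";)({}#][<>\n\t".toList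
        ∧ ¬("--".toList <+: name.toList.drop j) ∧ ¬("..".toList <+: name.toList.drop j) := by
  rw [List.any_eq_false, List.any_eq_false]
  constructor
  · rintro ⟨h1, h2⟩ j _ hj
    refine ⟨?_, ?_, ?_⟩
    · intro hmem
      rw [PySem.Set.mem_ofList] at hmem
      apply h1 _ hmem
      rw [decide_eq_true_iff, PySem.Str.find_nonneg_iff]
      have he : (String.ofList [name.toList[j]]).toList = [name.toList[j]] := String.toList_ofList
      rw [he]
      exact (pv_singleton_infix _ _).mpr (List.getElem_mem hj)
    · intro hp
      apply h2 "--" (by simp)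
      rw [decide_eq_true_iff, PySem.Str.find_nonneg_iff]
      exact (PySem.Chars.isIn_iff_infix _ _).mp
        ((PySem.Chars.exists_prefix_drop_iff_isIn _ _).mp ⟨j, hp⟩)
    · intro hp
      apply h2 ".." (by simp)
      rw [decide_eq_true_iff, PySem.Str.find_nonneg_iff]
      exact (PySem.Chars.isIn_iff_infix _ _).mp
        ((PySem.Chars.exists_prefix_drop_iff_isIn _ _).mp ⟨j, hp⟩)
  · intro h
    constructor
    · intro c hc hd
      rw [decide_eq_true_iff, PySem.Str.find_nonneg_iff] at hd
      have he : (String.ofList [c]).toList = [c] := String.toList_ofList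
      rw [he] at hd
      have hmem : c ∈ name.toList := (pv_singleton_infix _ _).mp hd
      obtain ⟨j, hj, hcj⟩ := List.mem_iff_getElem.mp hmem
      exact (h j (Nat.zero_le _) hj).1 (by rw [PySem.Set.mem_ofList, hcj]; exact hc)
    · intro sub hsub hd
      rw [decide_eq_true_iff, PySem.Str.find_nonneg_iff] at hd
      rcases List.mem_cons.mp hsub with rfl | hs2
      · exact (pv_infix_iff_forall_drop _ _ (by decide)).mpr
          (fun j hj => (h j (Nat.zero_le _) hj).2.1) hd
      · rcases List.mem_singleton.mp hs2 with rfl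
        exact (pv_infix_iff_forall_drop _ _ (by decide)).mpr
          (fun j hj => (h j (Nat.zero_le _) hj).2.2) hd

-- A's nested early-return ifs return true iff both scans come up empty
theorem pv_if_iff (a b : Bool) :
    (if a then false else if b then false else (true : Bool)) = true ↔ a = false ∧ b = false := by
  cases a <;> cases b <;> simp

-- ===== VERDICT (by name: the statement is the Claim_ definition above) =====
theorem is_valid_display_name_spec : Claim_equal_is_valid_display_name := by
  intro name _
  unfold Spec_is_valid_display_name is_valid_display_name is_valid_display_name_alt
  by_cases hg : 3 < ((PySem.Str.split? name " ").getD []).length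
  · simp only [hg, if_true]
  · simp only [hg, if_false]
    rw [Bool.eq_iff_iff, pvAltLoop_iff, pv_if_iff, pv_conds_iff]
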